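-- pv_equiv track=rewrite | github.com/tuxx42/posterpusher | dashboard.py | _merge_similar_labels
-- ===== SOURCE A (Python) =====
-- def _edit_distance(a, b):
--     """Compute Levenshtein edit distance between two strings."""
--     if len(a) < len(b):
--         return _edit_distance(b, a)
--     if not b:
--         return len(a)
--     prev = list(range(len(b) + 1))
--     for i, ca in enumerate(a):
--         curr = [i + 1]
--         for j, cb in enumerate(b):
--             curr.append(min(prev[j + 1] + 1, curr[j] + 1, prev[j] + (ca != cb)))
--         prev = curr
--     return prev[-1]
--
-- def _merge_similar_labels(label_amounts):
--     """Merge expense labels that differ only by small typos.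
--
--     Uses case-insensitive comparison. Allowed edit distance scales with
--     string length: 1 for short labels (<=6 chars), 2 for longer ones.
--     The label with the highest total amount is kept as the canonical name.
--     """
--     canonical = {}  # lowered_label -> (display_label, total_amount)
--     for label, amount in label_amounts.items():
--         lower = label.lower()
--         merged = False
--         for key in list(canonical):
--             max_dist = 1 if max(len(lower), len(key)) <= 6 else 2
--             if _edit_distance(lower, key) <= max_dist:
--                 existing_label, existing_amount = canonical[key]
--                 new_total = existing_amount + amount
--                 # Keep the label that had more money as the canonical name
--                 if amount > existing_amount:
--                     canonical[lower] = (label, new_total)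
--                     if key != lower:
--                         del canonical[key]
--                 else:
--                     canonical[key] = (existing_label, new_total)
--                 merged = True
--                 break
--         if not merged:
--             canonical[lower] = (label, amount)
--
--     from collections import defaultdict
--     result = defaultdict(int)
--     for display_label, total in canonical.values():
--         result[display_label] = total
--     return result
-- ===== SOURCE B (Python) =====
-- def _within(a, b, k):
--     """True iff the Levenshtein distance between a and b is <= k (k >= 0).
--
--     Bounded-band recursion with early pruning instead of the full DP table:
--     mismatch branches can only go k deep, so this is O(3^k * n) instead of
--     O(len(a) * len(b)).
--     """
--     if len(a) - len(b) > k or len(b) - len(a) > k: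
--         return False
--     if not a or not b:
--         return True
--     if a[-1] == b[-1]:
--         return _within(a[:-1], b[:-1], k)
--     return k > 0 and (_within(a[:-1], b, k - 1)
--                       or _within(a, b[:-1], k - 1)
--                       or _within(a[:-1], b[:-1], k - 1))
--
--
-- def _find_similar(keys, lower):
--     """First key within the allowed edit distance of lower, else None."""
--     for key in keys:
--         k = 1 if max(len(lower), len(key)) <= 6 else 2
--         if _within(lower, key, k):
--             return key
--     return None
--
--
-- def _merge_similar_labels(label_amounts):
--     canonical = {}  # lowered_label -> (display_label, total_amount)
--     for label, amount in label_amounts.items():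
--         lower = label.lower()
--         key = _find_similar(list(canonical), lower)
--         if key is None:
--             canonical[lower] = (label, amount)
--         else:
--             existing_label, existing_amount = canonical[key]
--             total = existing_amount + amount
--             if amount > existing_amount:
--                 canonical[lower] = (label, total)
--                 if key != lower:
--                     del canonical[key]
--             else:
--                 canonical[key] = (existing_label, total)
--     return {label: total for label, total in canonical.values()}
-- ===== Notes on version B (the rewrite author's own statement) =====
-- stated objective: faster
-- what changed: The full O(len(a)*len(b)) Levenshtein DP table is replaced by a threshold-bounded recursive check (length pruning, common-last-character skip, at most 3^k mismatch branches for the thresholds k<=2), and the inline merge loop with its merged flag is decomposed into a first-matching-key helper; the final aggregation becomes a dict comprehension.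
import Mathlib
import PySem

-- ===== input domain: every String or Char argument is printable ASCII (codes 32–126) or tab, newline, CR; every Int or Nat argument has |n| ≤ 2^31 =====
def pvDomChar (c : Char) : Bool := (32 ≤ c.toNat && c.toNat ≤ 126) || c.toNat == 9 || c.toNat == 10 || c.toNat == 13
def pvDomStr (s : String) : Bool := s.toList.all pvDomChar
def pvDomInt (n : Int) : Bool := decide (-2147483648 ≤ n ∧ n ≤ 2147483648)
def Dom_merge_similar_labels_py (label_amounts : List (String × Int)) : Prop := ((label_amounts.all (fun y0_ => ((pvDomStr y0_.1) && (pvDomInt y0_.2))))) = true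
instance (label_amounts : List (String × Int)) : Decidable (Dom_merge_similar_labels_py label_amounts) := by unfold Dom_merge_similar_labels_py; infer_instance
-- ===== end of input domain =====

-- B replaces A's full O(len(a)*len(b)) Levenshtein DP by a bounded-distance recursive check
-- (pruned at threshold k ∈ {1,2}) and restructures the merge step around a first-match helper.

-- ===== PORT A =====
-- _edit_distance on lists of chars: the swap recursion and both enumerate loops, rows as lists.
def pvEdDist (a b : List Char) : Int :=
  if h : a.length < b.length then pvEdDist b a
  else if b = [] then (a.length : Int)
  else
    let last := (PySem.List.enumerate a 0).foldl
      (fun prev ica =>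
        (PySem.List.enumerate b 0).foldl
          (fun curr jcb =>
            curr ++ [min (min (PySem.List.pyGetD prev (jcb.1 + 1) 0 + 1)
                              (PySem.List.pyGetD curr jcb.1 0 + 1))
                         (PySem.List.pyGetD prev jcb.1 0 + (if ica.2 ≠ jcb.2 then 1 else 0))])
          [ica.1 + 1])
      (PySem.List.pyRange 0 ((b.length : Int) + 1) 1)
    PySem.List.pyGetD last (-1) 0
termination_by (if a.length < b.length then 1 else 0)
decreasing_by simp only [if_pos h, if_neg (by omega : ¬ b.length < a.length)]; omega

-- 'for key in list(canonical): … break' with the merged flag, as a scan over the key snapshot;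
-- canonical[key] is read with getD (key is always a live key of canonical when this is reached).
def pvScanA (canonical : PySem.Dict String (String × Int)) (keys : List String)
    (lower label : String) (amount : Int) : PySem.Dict String (String × Int) :=
  match keys with
  | [] => canonical.insert lower (label, amount)
  | key :: rest =>
    let max_dist : Int := if max (PySem.Str.len lower) (PySem.Str.len key) ≤ 6 then 1 else 2
    if pvEdDist lower.toList key.toList ≤ max_dist then
      let p := canonical.getD key ("", 0)
      let new_total := p.2 + amount
      if amount > p.2 then
        let c := canonical.insert lower (label, new_total)
        if key ≠ lower then c.erase key else c
      else canonical.insert key (p.1, new_total)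
    else pvScanA canonical rest lower label amount

def merge_similar_labels_py (label_amounts : List (String × Int)) : List (String × Int) :=
  let canonical := label_amounts.foldl
    (fun canonical la => pvScanA canonical canonical.keys (PySem.Str.lower la.1) la.1 la.2)
    (PySem.Dict.empty : PySem.Dict String (String × Int))
  (canonical.values.foldl (fun r p => r.insert p.1 p.2)
    (PySem.Dict.empty : PySem.Dict String Int)).items

-- ===== PORT B =====
-- _within: bounded edit-distance check, recursing on the LAST characters
-- (a[:-1] = dropLast, a[-1] = pyGetD a (-1), exact on the nonempty lists it is reached on).
def pvWithin (a b : List Char) (k : Int) : Bool :=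
  if ((a.length : Int) - b.length > k) ∨ ((b.length : Int) - a.length > k) then false
  else if hab : a = [] ∨ b = [] then true
  else if PySem.List.pyGetD a (-1) ' ' = PySem.List.pyGetD b (-1) ' ' then
    pvWithin a.dropLast b.dropLast k
  else
    decide (k > 0) && (pvWithin a.dropLast b (k - 1) || pvWithin a b.dropLast (k - 1)
                       || pvWithin a.dropLast b.dropLast (k - 1))
termination_by a.length + b.length
decreasing_by
  all_goals
    (rcases not_or.mp hab with ⟨ha, hb⟩
     have h1 : 0 < a.length := List.length_pos_iff.mpr ha
     have h2 : 0 < b.length := List.length_pos_iff.mpr hb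
     simp [List.length_dropLast]; omega)

-- _find_similar: first key of the snapshot within the allowed distance of lower, else none.
def pvFindSimilar (keys : List String) (lower : String) : Option String :=
  match keys with
  | [] => none
  | key :: rest =>
    let k : Int := if max (PySem.Str.len lower) (PySem.Str.len key) ≤ 6 then 1 else 2
    if pvWithin lower.toList key.toList k then some key else pvFindSimilar rest lower

def merge_similar_labels_py_alt (label_amounts : List (String × Int)) : List (String × Int) :=
  let canonical := label_amounts.foldl
    (fun canonical la =>
      let lower := PySem.Str.lower la.1
      match pvFindSimilar canonical.keys lower with
      | none => canonical.insert lower (la.1, la.2)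
      | some key =>
        let p := canonical.getD key ("", 0)
        let total := p.2 + la.2
        if la.2 > p.2 then
          let c := canonical.insert lower (la.1, total)
          if key ≠ lower then c.erase key else c
        else canonical.insert key (p.1, total))
    (PySem.Dict.empty : PySem.Dict String (String × Int))
  (canonical.values.foldl (fun r p => r.insert p.1 p.2)
    (PySem.Dict.empty : PySem.Dict String Int)).items

-- ===== PRECONDITION & SPEC =====
def Spec_merge_similar_labels_py (label_amounts : List (String × Int)) (out : List (String × Int)) : Prop := out = merge_similar_labels_py_alt label_amounts
instance (label_amounts : List (String × Int)) (out : List (String × Int)) : Decidable (Spec_merge_similar_labels_py label_amounts out) := by unfold Spec_merge_similar_labels_py; infer_instance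

-- ===== CLAIM (what is proved, stated in full; the proofs are below) =====
def Claim_equal_merge_similar_labels_py : Prop := ∀ (label_amounts : List (String × Int)), Dom_merge_similar_labels_py label_amounts → Spec_merge_similar_labels_py label_amounts (merge_similar_labels_py label_amounts)

-- ===== LEMMAS AND PROOFS =====

def levR : List Char → List Char → Nat
  | [], b => b.length
  | _ :: a, [] => a.length + 1
  | x :: a, y :: b =>
      min (levR a (y :: b) + 1) (min (levR (x :: a) b + 1) (levR a b + if x = y then 0 else 1))
termination_by a b => a.length + b.length

theorem levR_nil_right (a : List Char) : levR a [] = a.length := by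
  cases a <;> simp [levR]

theorem levR_nil_left (b : List Char) : levR [] b = b.length := by
  cases b <;> simp [levR]

theorem levR_symm_aux (n : Nat) : ∀ a b : List Char, a.length + b.length ≤ n →
    levR a b = levR b a := by
  induction n with
  | zero =>
    intro a b h
    rw [Nat.le_zero, Nat.add_eq_zero_iff] at h
    rw [List.eq_nil_of_length_eq_zero h.1, List.eq_nil_of_length_eq_zero h.2]
  | succ n ih =>
    intro a b h
    cases a with
    | nil => rw [levR_nil_left, levR_nil_right]
    | cons x a' =>
      cases b with
      | nil => rw [levR_nil_left, levR_nil_right]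
      | cons y b' =>
        simp only [List.length_cons] at h
        simp only [levR]
        rw [ih a' (y :: b') (by (try simp only [List.length_cons]); omega), ih (x :: a') b' (by (try simp only [List.length_cons]); omega),
          ih a' b' (by omega)]
        by_cases hxy : x = y
        · subst hxy; omega
        · rw [if_neg hxy, if_neg (Ne.symm hxy)]; omega

theorem levR_symm (a b : List Char) : levR a b = levR b a :=
  levR_symm_aux (a.length + b.length) a b le_rfl

theorem levR_add_length_aux (n : Nat) : ∀ a b : List Char, a.length + b.length ≤ n →
    a.length ≤ levR a b + b.length := by
  induction n with
  | zero =>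
    intro a b h
    rw [Nat.le_zero, Nat.add_eq_zero_iff] at h
    rw [List.eq_nil_of_length_eq_zero h.1]; simp
  | succ n ih =>
    intro a b h
    cases a with
    | nil => simp
    | cons x a' =>
      cases b with
      | nil => simp [levR_nil_right]
      | cons y b' =>
        simp only [List.length_cons] at h
        have h1 := ih a' (y :: b') (by (try simp only [List.length_cons]); omega)
        have h2 := ih (x :: a') b' (by (try simp only [List.length_cons]); omega)
        have h3 := ih a' b' (by omega)
        simp only [List.length_cons] at h1 h2
        simp only [levR, List.length_cons]
        by_cases hxy : x = y
        · subst hxy; omega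
        · rw [if_neg hxy]; omega

theorem levR_add_length (a b : List Char) : a.length ≤ levR a b + b.length :=
  levR_add_length_aux (a.length + b.length) a b le_rfl

theorem levR_cons_left_le (x : Char) (a b : List Char) : levR (x :: a) b ≤ levR a b + 1 := by
  cases b with
  | nil => simp [levR_nil_right]
  | cons y b' => simp only [levR]; omega

theorem levR_le_cons_right_aux (n : Nat) : ∀ (a b : List Char) (y : Char),
    a.length + b.length ≤ n → levR a b ≤ levR a (y :: b) + 1 := by
  induction n with
  | zero =>
    intro a b y h
    rw [Nat.le_zero, Nat.add_eq_zero_iff] at h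
    rw [List.eq_nil_of_length_eq_zero h.1, levR_nil_left, levR_nil_left]
    simp only [List.length_cons]; omega
  | succ n ih =>
    intro a b y h
    cases a with
    | nil => rw [levR_nil_left, levR_nil_left]; simp only [List.length_cons]; omega
    | cons x a' =>
      cases b with
      | nil =>
        have hd := levR_add_length a' [y]
        simp only [levR_nil_right, List.length_cons, List.length_nil] at *
        by_cases hxy : x = y
        · subst hxy; simp [levR, levR_nil_right]; omega
        · simp [levR, levR_nil_right, hxy]; omega
      | cons y' b' =>
        simp only [List.length_cons] at h
        have hA := levR_cons_left_le x a' (y' :: b')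
        have hB := ih a' (y' :: b') y (by (try simp only [List.length_cons]); omega)
        conv_rhs => rw [levR]
        by_cases hxy : x = y
        · subst hxy; rw [if_pos rfl]; omega
        · rw [if_neg hxy]; omega

theorem levR_le_cons_right (a b : List Char) (y : Char) : levR a b ≤ levR a (y :: b) + 1 :=
  levR_le_cons_right_aux (a.length + b.length) a b y le_rfl

theorem levR_le_cons_left (a b : List Char) (x : Char) : levR a b ≤ levR (x :: a) b + 1 := by
  rw [levR_symm a b, levR_symm (x :: a) b]; exact levR_le_cons_right b a x

theorem levR_cons_cons_same (c : Char) (a b : List Char) : levR (c :: a) (c :: b) = levR a b := by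
  have h1 := levR_le_cons_right a b c
  have h2 := levR_le_cons_left a b c
  simp [levR]; omega

theorem within_spec_aux (n : Nat) : ∀ (ra rb : List Char) (k : Int),
    ra.length + rb.length ≤ n → 0 ≤ k →
    pvWithin ra.reverse rb.reverse k = decide ((levR ra rb : Int) ≤ k) := by
  induction n with
  | zero =>
    intro ra rb k h hk
    rw [Nat.le_zero, Nat.add_eq_zero_iff] at h
    rw [List.eq_nil_of_length_eq_zero h.1, List.eq_nil_of_length_eq_zero h.2]
    rw [pvWithin, levR_nil_left]
    simp [hk]
  | succ n ih =>
    intro ra rb k h hk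
    rw [pvWithin]
    simp only [List.length_reverse]
    by_cases hp : ((ra.length : Int) - rb.length > k) ∨ ((rb.length : Int) - ra.length > k)
    · rw [if_pos hp]
      have d1 := levR_add_length ra rb
      have d2 := levR_add_length rb ra
      rw [levR_symm rb ra] at d2
      symm; rw [decide_eq_false_iff_not]
      omega
    · rw [if_neg hp]
      by_cases he : ra.reverse = [] ∨ rb.reverse = []
      · rw [dif_pos he]
        rcases he with he | he
        · rw [List.reverse_eq_nil_iff] at he; subst he
          rw [levR_nil_left]; symm; rw [decide_eq_true_iff]
          simp only [List.length_nil] at hp; omega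
        · rw [List.reverse_eq_nil_iff] at he; subst he
          rw [levR_nil_right]; symm; rw [decide_eq_true_iff]
          simp only [List.length_nil] at hp; omega
      · rw [dif_neg he]
        rcases ra with _ | ⟨x, ra'⟩
        · simp at he
        rcases rb with _ | ⟨y, rb'⟩
        · simp at he
        simp only [List.length_cons] at h
        simp only [List.reverse_cons, PySem.List.pyGetD_neg_one_append_singleton,
          List.dropLast_concat]
        by_cases hxy : x = y
        · subst hxy
          rw [if_pos rfl]
          have := ih ra' rb' k (by omega) hk
          rw [this, levR_cons_cons_same]
        · rw [if_neg hxy]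
          by_cases hk0 : 0 < k
          · have h1 : pvWithin ra'.reverse ((y :: rb').reverse) (k - 1)
                = decide ((levR ra' (y :: rb') : Int) ≤ k - 1) :=
              ih ra' (y :: rb') (k - 1) (by simp only [List.length_cons]; omega) (by omega)
            have h2 : pvWithin ((x :: ra').reverse) rb'.reverse (k - 1)
                = decide ((levR (x :: ra') rb' : Int) ≤ k - 1) :=
              ih (x :: ra') rb' (k - 1) (by simp only [List.length_cons]; omega) (by omega)
            have h3 : pvWithin ra'.reverse rb'.reverse (k - 1)
                = decide ((levR ra' rb' : Int) ≤ k - 1) :=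
              ih ra' rb' (k - 1) (by omega) (by omega)
            simp only [List.reverse_cons] at h1 h2
            rw [h1, h2, h3, decide_eq_true hk0, Bool.true_and]
            simp only [levR, if_neg hxy, ← Bool.decide_or]
            rw [decide_eq_decide]
            push_cast
            omega
          · have hk' : k = 0 := by omega
            subst hk'
            simp only [levR, if_neg hxy]
            symm
            rw [show decide ((0:Int) > 0) = false from rfl, Bool.false_and,
              decide_eq_false_iff_not]
            push_cast
            omega

def pvRow (u b : List Char) (m : Nat) : List Int :=
  (List.range (m + 1)).map (fun t => ((levR u.reverse ((b.take t).reverse) : Nat) : Int))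

theorem pvRow_get (u b : List Char) (m t : Nat) (h : t ≤ m) :
    PySem.List.pyGetD (pvRow u b m) (t : Int) 0
      = ((levR u.reverse ((b.take t).reverse) : Nat) : Int) := by
  rw [PySem.List.pyGetD_natCast, pvRow, PySem.List.getD_map_range _ _ _ _ (by omega)]

theorem pvRow_succ (u b : List Char) (m : Nat) :
    pvRow u b (m + 1)
      = pvRow u b m ++ [((levR u.reverse ((b.take (m+1)).reverse) : Nat) : Int)] := by
  rw [pvRow, pvRow, List.range_succ, List.map_append, List.map_cons, List.map_nil]

theorem inner_loop (u b : List Char) (ca : Char) :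
    ∀ (b2 b1 : List Char), b = b1 ++ b2 →
    (PySem.List.enumerate b2 (b1.length : Int)).foldl
      (fun curr jcb =>
        curr ++ [min (min (PySem.List.pyGetD (pvRow u b b.length) (jcb.1 + 1) 0 + 1)
                          (PySem.List.pyGetD curr jcb.1 0 + 1))
                     (PySem.List.pyGetD (pvRow u b b.length) jcb.1 0 + (if ca ≠ jcb.2 then 1 else 0))])
      (pvRow (u ++ [ca]) b b1.length)
    = pvRow (u ++ [ca]) b b.length := by
  intro b2
  induction b2 with
  | nil =>
    intro b1 hb
    rw [List.append_nil] at hb; subst hb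
    rw [PySem.List.enumerate_nil, List.foldl_nil]
  | cons cb b2' ih =>
    intro b1 hb
    have hm1 : b1.length + 1 ≤ b.length := by
      subst hb; simp only [List.length_append, List.length_cons]; omega
    have htake : b.take b1.length = b1 := by subst hb; simp
    have htake1 : b.take (b1.length + 1) = b1 ++ [cb] := by
      subst hb
      rw [List.take_append]
      simp
    rw [PySem.List.enumerate_cons, List.foldl_cons]
    have hstep :
        (pvRow (u ++ [ca]) b b1.length ++
          [min (min (PySem.List.pyGetD (pvRow u b b.length) ((b1.length : Int) + 1) 0 + 1)
                    (PySem.List.pyGetD (pvRow (u ++ [ca]) b b1.length) (b1.length : Int) 0 + 1))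
               (PySem.List.pyGetD (pvRow u b b.length) (b1.length : Int) 0
                 + (if ca ≠ cb then 1 else 0))])
        = pvRow (u ++ [ca]) b (b1.length + 1) := by
      have g1 : PySem.List.pyGetD (pvRow u b b.length) ((b1.length : Int) + 1) 0
          = ((levR u.reverse ((b.take (b1.length + 1)).reverse) : Nat) : Int) := by
        rw [show ((b1.length : Int) + 1) = ((b1.length + 1 : Nat) : Int) by push_cast; ring]
        exact pvRow_get u b b.length (b1.length + 1) hm1
      have g2 : PySem.List.pyGetD (pvRow (u ++ [ca]) b b1.length) (b1.length : Int) 0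
          = ((levR (u ++ [ca]).reverse ((b.take b1.length).reverse) : Nat) : Int) :=
        pvRow_get (u ++ [ca]) b b1.length b1.length le_rfl
      have g3 : PySem.List.pyGetD (pvRow u b b.length) (b1.length : Int) 0
          = ((levR u.reverse ((b.take b1.length).reverse) : Nat) : Int) :=
        pvRow_get u b b.length b1.length (by omega)
      rw [g1, g2, g3, pvRow_succ, htake, htake1]
      congr 1
      rw [List.reverse_append, List.reverse_cons, List.reverse_nil, List.nil_append,
        List.reverse_append]
      simp only [List.reverse_cons, List.reverse_nil, List.nil_append, List.singleton_append]
      rw [show levR (ca :: u.reverse) (cb :: b1.reverse)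
            = min (levR u.reverse (cb :: b1.reverse) + 1)
                (min (levR (ca :: u.reverse) b1.reverse + 1)
                  (levR u.reverse b1.reverse + if ca = cb then 0 else 1)) from by rw [levR]]
      by_cases hc : ca = cb
      · simp [hc]
        omega
      · simp [hc]
    rw [hstep]
    have := ih (b1 ++ [cb]) (by rw [hb]; simp)
    simp only [List.length_append, List.length_cons, List.length_nil] at this
    rw [show ((b1.length : Int) + 1) = ((b1.length + 1 : Nat) : Int) by push_cast; ring]
    exact this

theorem pvRow_zero (v b : List Char) :
    pvRow v b 0 = [((levR v.reverse [] : Nat) : Int)] := by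
  simp [pvRow]

theorem outer_loop (b : List Char) :
    ∀ (a2 a1 : List Char),
    (PySem.List.enumerate a2 (a1.length : Int)).foldl
      (fun prev ica =>
        (PySem.List.enumerate b 0).foldl
          (fun curr jcb =>
            curr ++ [min (min (PySem.List.pyGetD prev (jcb.1 + 1) 0 + 1)
                              (PySem.List.pyGetD curr jcb.1 0 + 1))
                         (PySem.List.pyGetD prev jcb.1 0 + (if ica.2 ≠ jcb.2 then 1 else 0))])
          [ica.1 + 1])
      (pvRow a1 b b.length)
    = pvRow (a1 ++ a2) b b.length := by
  intro a2
  induction a2 with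
  | nil =>
    intro a1
    rw [PySem.List.enumerate_nil, List.foldl_nil, List.append_nil]
  | cons ca a2' ih =>
    intro a1
    rw [PySem.List.enumerate_cons, List.foldl_cons]
    have hinit : [((a1.length : Int) + 1)] = pvRow (a1 ++ [ca]) b 0 := by
      rw [pvRow_zero]
      rw [List.reverse_append]
      simp [levR]
    have hin := inner_loop a1 b ca b [] (by simp)
    simp only [List.length_nil, Nat.cast_zero] at hin
    rw [hinit, hin]
    have := ih (a1 ++ [ca])
    simp only [List.length_append, List.length_cons, List.length_nil] at this
    rw [show ((a1.length : Int) + 1) = ((a1.length + 1 : Nat) : Int) by push_cast; ring]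
    rw [List.append_assoc] at this
    simpa using this

theorem pvRow_init (b : List Char) :
    PySem.List.pyRange 0 ((b.length : Int) + 1) 1 = pvRow [] b b.length := by
  rw [show ((b.length : Int) + 1) = ((b.length + 1 : Nat) : Int) by push_cast; ring,
    PySem.List.pyRange_zero_natCast, pvRow]
  apply List.map_congr_left
  intro t ht
  rw [List.mem_range] at ht
  rw [List.reverse_nil, levR_nil_left]
  simp
  omega

theorem edist_noswap (a b : List Char) (h : ¬ a.length < b.length) :
    pvEdDist a b = ((levR a.reverse b.reverse : Nat) : Int) := by
  rw [pvEdDist, dif_neg h]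
  by_cases hb : b = []
  · rw [if_pos hb]; subst hb
    simp [levR_nil_right]
  · rw [if_neg hb]
    have h0 := outer_loop b a []
    simp only [List.length_nil, Nat.cast_zero, List.nil_append] at h0
    rw [pvRow_init, h0, pvRow, List.range_succ, List.map_append, List.map_cons, List.map_nil,
      PySem.List.pyGetD_neg_one_append_singleton, List.take_length]

theorem edist_eq (a b : List Char) : pvEdDist a b = ((levR a.reverse b.reverse : Nat) : Int) := by
  by_cases h : a.length < b.length
  · rw [pvEdDist, dif_pos h, edist_noswap b a (by omega), levR_symm]
  · exact edist_noswap a b h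


theorem within_spec (a b : List Char) (k : Int) (hk : 0 ≤ k) :
    pvWithin a b k = decide ((levR a.reverse b.reverse : Int) ≤ k) := by
  have := within_spec_aux (a.reverse.length + b.reverse.length) a.reverse b.reverse k le_rfl hk
  simpa using this

-- the two membership tests agree, hence the scan of A is B's find-then-update
theorem scan_eq (keys : List String) (c : PySem.Dict String (String × Int))
    (lower label : String) (amount : Int) :
    pvScanA c keys lower label amount =
      (match pvFindSimilar keys lower with
       | none => c.insert lower (label, amount)
       | some key =>
         let p := c.getD key ("", 0)
         let total := p.2 + amount
         if amount > p.2 then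
           let c' := c.insert lower (label, total)
           if key ≠ lower then c'.erase key else c'
         else c.insert key (p.1, total)) := by
  induction keys with
  | nil => rfl
  | cons key rest ih =>
    rw [pvScanA, pvFindSimilar]
    have hk : (0:Int) ≤ (if max (PySem.Str.len lower) (PySem.Str.len key) ≤ 6 then (1:Int) else 2) := by
      split <;> omega
    have hcond : (pvWithin lower.toList key.toList
          (if max (PySem.Str.len lower) (PySem.Str.len key) ≤ 6 then (1:Int) else 2) = true)
        ↔ (pvEdDist lower.toList key.toList ≤
          (if max (PySem.Str.len lower) (PySem.Str.len key) ≤ 6 then (1:Int) else 2)) := by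
      rw [within_spec _ _ _ hk, edist_eq, decide_eq_true_iff]
    by_cases h : pvEdDist lower.toList key.toList ≤
        (if max (PySem.Str.len lower) (PySem.Str.len key) ≤ 6 then (1:Int) else 2)
    · simp only [if_pos h, if_pos (hcond.mpr h)]
    · simp only [if_neg h, if_neg (fun hb => h (hcond.mp hb)), ih]

-- ===== VERDICT (by name: the statement is the Claim_ definition above) =====
theorem merge_similar_labels_py_spec : Claim_equal_merge_similar_labels_py := by
  intro label_amounts _
  unfold Spec_merge_similar_labels_py merge_similar_labels_py merge_similar_labels_py_alt
  have : (fun (canonical : PySem.Dict String (String × Int)) (la : String × Int) =>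
        pvScanA canonical canonical.keys (PySem.Str.lower la.1) la.1 la.2) =
      (fun canonical la =>
        let lower := PySem.Str.lower la.1
        match pvFindSimilar canonical.keys lower with
        | none => canonical.insert lower (la.1, la.2)
        | some key =>
          let p := canonical.getD key ("", 0)
          let total := p.2 + la.2
          if la.2 > p.2 then
            let c := canonical.insert lower (la.1, total)
            if key ≠ lower then c.erase key else c
          else canonical.insert key (p.1, total)) := by
    funext c la
    exact scan_eq c.keys c (PySem.Str.lower la.1) la.1 la.2
  rw [this]
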